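-- pv_equiv track=rewrite | github.com/AkifMehmood/Legal-Documents | agent.py | verify_bailii_case_url
-- ===== SOURCE A (Python) =====
-- def verify_bailii_case_url(url: str) -> bool:
--     """Verify that a BAILII URL is a real case URL."""
--     try:
--         # Check if URL has proper BAILII case structure
--         if not url or "bailii.org" not in url:
--             return False
--
--         # Check for proper case URL patterns
--         case_patterns = [
--             "/uk/cases/EWCA/",  # Court of Appeal
--             "/uk/cases/EWHC/",  # High Court
--             "/uk/cases/UKSC/",  # Supreme Court
--             "/uk/cases/UKPC/",  # Privy Council
--             "/uk/cases/UKHL/",  # House of Lords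
--             "/uk/cases/UKET/",  # Employment Tribunal
--             "/uk/cases/UKUT/",  # Upper Tribunal
--             "/uk/cases/UKFTT/", # First-tier Tribunal
--         ]
--
--         return any(pattern in url for pattern in case_patterns)
--     except Exception:
--         return False
-- ===== SOURCE B (Python) =====
-- _COURTS = ("EWCA/", "EWHC/", "UKSC/", "UKPC/", "UKHL/", "UKET/", "UKUT/", "UKFTT/")
--
--
-- def verify_bailii_case_url(url: str) -> bool:
--     """Verify that a BAILII URL is a real case URL (single positional scan)."""
--     try:
--         if not url or "bailii.org" not in url:
--             return False
--         for i in range(len(url)):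
--             tail = url[i:]
--             if tail.startswith("/uk/cases/") and tail[10:].startswith(_COURTS):
--                 return True
--         return False
--     except Exception:
--         return False
-- ===== Notes on version B (the rewrite author's own statement) =====
-- stated objective: alternative
-- what changed: Replaces A's any() over eight independent full-pattern substring searches with a single left-to-right scan that, at each position, checks for the shared '/uk/cases/' prefix followed by one of the eight court codes.
import Mathlib
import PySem

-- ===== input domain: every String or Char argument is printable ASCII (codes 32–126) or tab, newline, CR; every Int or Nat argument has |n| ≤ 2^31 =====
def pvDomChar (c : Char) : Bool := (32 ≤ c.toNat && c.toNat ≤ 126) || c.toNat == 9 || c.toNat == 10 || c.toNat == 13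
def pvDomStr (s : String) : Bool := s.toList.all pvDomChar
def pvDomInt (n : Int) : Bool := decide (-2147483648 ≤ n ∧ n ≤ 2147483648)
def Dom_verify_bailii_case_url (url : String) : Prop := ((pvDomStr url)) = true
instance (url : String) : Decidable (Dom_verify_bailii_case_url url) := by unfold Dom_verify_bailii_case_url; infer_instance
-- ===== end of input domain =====

-- B replaces A's eight independent substring searches by one left-to-right positional
-- scan of the URL (alternative decomposition; return value only, no side effects).

-- ===== PORT A =====
-- A's list of full case-URL patterns, in A's order.
def pvCasePatterns : List (List Char) :=
  ["/uk/cases/EWCA/".toList, "/uk/cases/EWHC/".toList, "/uk/cases/UKSC/".toList,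
   "/uk/cases/UKPC/".toList, "/uk/cases/UKHL/".toList, "/uk/cases/UKET/".toList,
   "/uk/cases/UKUT/".toList, "/uk/cases/UKFTT/".toList]

def verify_bailii_case_url (url : String) : Bool :=
  -- `if not url or "bailii.org" not in url: return False`
  if url.toList = [] ∨ PySem.Chars.isIn "bailii.org".toList url.toList = false then false
  -- `return any(pattern in url for pattern in case_patterns)`
  else pvCasePatterns.any (fun p => PySem.Chars.isIn p url.toList)

-- ===== PORT B =====
-- B's tuple of court prefixes (what follows "/uk/cases/"), in B's order.
def pvCourts : List (List Char) :=
  ["EWCA/".toList, "EWHC/".toList, "UKSC/".toList, "UKPC/".toList,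
   "UKHL/".toList, "UKET/".toList, "UKUT/".toList, "UKFTT/".toList]

-- B's `for i in range(len(url))` loop: visits every nonempty suffix `tail = url[i:]`,
-- returning True as soon as tail starts with "/uk/cases/" followed by a court code.
def pvScanCases : List Char → Bool
  | [] => false
  | c :: rest =>
      (PySem.Chars.startswith (c :: rest) "/uk/cases/".toList &&
       pvCourts.any (fun q => PySem.Chars.startswith ((c :: rest).drop 10) q))
      || pvScanCases rest

def verify_bailii_case_url_alt (url : String) : Bool :=
  if url.toList = [] ∨ PySem.Chars.isIn "bailii.org".toList url.toList = false then false
  else pvScanCases url.toList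

-- ===== PRECONDITION & SPEC =====
def Spec_verify_bailii_case_url (url : String) (out : Bool) : Prop := out = verify_bailii_case_url_alt url
instance (url : String) (out : Bool) : Decidable (Spec_verify_bailii_case_url url out) := by unfold Spec_verify_bailii_case_url; infer_instance

-- ===== CLAIM (what is proved, stated in full; the proofs are below) =====
def Claim_equal_verify_bailii_case_url : Prop := ∀ (url : String), Dom_verify_bailii_case_url url → Spec_verify_bailii_case_url url (verify_bailii_case_url url)

-- ===== LEMMAS AND PROOFS =====

-- a ++ b is a prefix of t iff a is and b is a prefix of what is left after a.
lemma pv_append_prefix_iff (a b t : List Char) :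
    a ++ b <+: t ↔ a <+: t ∧ b <+: t.drop a.length := by
  constructor
  · rintro ⟨r, rfl⟩
    refine ⟨⟨b ++ r, by simp⟩, ?_⟩
    rw [List.append_assoc, List.drop_left]
    exact List.prefix_append _ _
  · rintro ⟨⟨r, rfl⟩, hb⟩
    rw [List.drop_left] at hb
    obtain ⟨s, rfl⟩ := hb
    exact ⟨s, by simp⟩

-- each full pattern is "/uk/cases/" followed by the corresponding court code
lemma pv_patterns_eq :
    pvCasePatterns = pvCourts.map (fun q => "/uk/cases/".toList ++ q) := by decide

-- the head test of B's loop body matches exactly the full patterns prefixing the suffix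
lemma pv_cons_step (c : Char) (rest : List Char) :
    ((PySem.Chars.startswith (c :: rest) "/uk/cases/".toList &&
      pvCourts.any (fun q => PySem.Chars.startswith ((c :: rest).drop 10) q)) = true)
    ↔ ∃ p ∈ pvCasePatterns, p <+: (c :: rest) := by
  rw [pv_patterns_eq]
  simp only [Bool.and_eq_true, List.any_eq_true, PySem.Chars.startswith_iff,
    List.mem_map, exists_exists_and_eq_and]
  constructor
  · rintro ⟨hpre, q, hq, hcourt⟩
    exact ⟨q, hq, (pv_append_prefix_iff _ _ _).2 ⟨hpre, by simpa using hcourt⟩⟩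
  · rintro ⟨q, hq, hp⟩
    obtain ⟨hpre, hcourt⟩ := (pv_append_prefix_iff _ _ _).1 hp
    exact ⟨by simpa using hpre, q, hq, by simpa using hcourt⟩

-- B's scan finds exactly the URLs containing some full pattern
lemma pv_scan_eq (l : List Char) :
    pvScanCases l = pvCasePatterns.any (fun p => PySem.Chars.isIn p l) := by
  induction l with
  | nil => decide
  | cons c rest ih =>
      rw [Bool.eq_iff_iff]
      simp only [pvScanCases, Bool.or_eq_true, ih, List.any_eq_true,
        PySem.Chars.isIn_iff_infix, pv_cons_step, List.infix_cons_iff]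
      constructor
      · rintro (⟨p, hp, h⟩ | ⟨p, hp, h⟩)
        · exact ⟨p, hp, Or.inl h⟩
        · exact ⟨p, hp, Or.inr h⟩
      · rintro ⟨p, hp, h | h⟩
        · exact Or.inl ⟨p, hp, h⟩
        · exact Or.inr ⟨p, hp, h⟩

-- ===== VERDICT (by name: the statement is the Claim_ definition above) =====
theorem verify_bailii_case_url_spec : Claim_equal_verify_bailii_case_url := by
  intro url _
  unfold Spec_verify_bailii_case_url verify_bailii_case_url verify_bailii_case_url_alt
  split_ifs with h
  · rfl
  · exact (pv_scan_eq url.toList).symm
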